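-- pv_equiv track=rewrite | github.com/DavidSegalle/Cryptography-Algorithms | DetectarAutoria/DetectarAutoria.py | nPalavrasUnicas
-- ===== SOURCE A (Python) =====
-- def nPalavrasUnicas(lista_palavras):
--     # dict() retorna algo similar a um mapa da STL (c++)
--     freq = dict()
--     unicas = 0
--
--     for palavra in lista_palavras:
--         p = palavra.lower()
--         if p in freq:
--             if freq[p] == 1:
--                 unicas -= 1
--             freq[p] += 1
--         else:
--             freq[p] = 1
--             unicas += 1
--
--     return unicas
-- ===== SOURCE B (Python) =====
-- def nPalavrasUnicas(lista_palavras):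
--     freq = {}
--     for palavra in lista_palavras:
--         p = palavra.lower()
--         freq[p] = freq.get(p, 0) + 1
--     return sum(1 for v in freq.values() if v == 1)
-- ===== Notes on version B (the rewrite author's own statement) =====
-- stated objective: simpler
-- what changed: Replaces A's single pass that maintains a running 'unicas' counter with on-the-fly increments/decrements by a two-phase build-the-frequency-table-then-count-entries-equal-to-1 decomposition.
import Mathlib
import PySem

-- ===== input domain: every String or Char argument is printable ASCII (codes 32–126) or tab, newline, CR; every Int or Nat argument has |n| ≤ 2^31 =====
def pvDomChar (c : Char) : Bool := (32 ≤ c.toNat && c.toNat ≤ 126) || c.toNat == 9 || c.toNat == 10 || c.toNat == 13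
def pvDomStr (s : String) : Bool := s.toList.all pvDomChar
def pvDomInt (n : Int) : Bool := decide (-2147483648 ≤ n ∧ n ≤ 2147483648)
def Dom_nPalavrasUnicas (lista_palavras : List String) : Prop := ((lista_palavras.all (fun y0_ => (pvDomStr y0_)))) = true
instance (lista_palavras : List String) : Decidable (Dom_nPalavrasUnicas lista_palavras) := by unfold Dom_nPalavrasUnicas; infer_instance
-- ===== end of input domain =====

-- B replaces A's single pass with an on-the-fly ±1 'unicas' accumulator by a two-phase
-- build-the-frequency-table-then-count-values-equal-to-1 decomposition (objective: simpler).

-- ===== PORT A =====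
-- one loop iteration of A: state is (freq, unicas)
def nPalavrasUnicasStep (st : PySem.Dict String Int × Int) (palavra : String) :
    PySem.Dict String Int × Int :=
  let p := PySem.Str.lower palavra
  if st.1.contains p then
    -- 'if freq[p] == 1: unicas -= 1' then 'freq[p] += 1'
    let u := if st.1.getD p 0 = 1 then st.2 - 1 else st.2
    (st.1.insert p (st.1.getD p 0 + 1), u)
  else
    -- 'freq[p] = 1; unicas += 1'
    (st.1.insert p 1, st.2 + 1)

def nPalavrasUnicas (lista_palavras : List String) : Int :=
  (lista_palavras.foldl nPalavrasUnicasStep (PySem.Dict.empty, 0)).2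

-- ===== PORT B =====
def nPalavrasUnicas_alt (lista_palavras : List String) : Int :=
  let freq := lista_palavras.foldl
    (fun (d : PySem.Dict String Int) palavra =>
      let p := PySem.Str.lower palavra
      d.insert p (d.getD p 0 + 1)) PySem.Dict.empty
  ((freq.values.countP (fun v => v = 1) : Nat) : Int)

-- ===== PRECONDITION & SPEC =====
def Spec_nPalavrasUnicas (lista_palavras : List String) (out : Int) : Prop := out = nPalavrasUnicas_alt lista_palavras
instance (lista_palavras : List String) (out : Int) : Decidable (Spec_nPalavrasUnicas lista_palavras out) := by unfold Spec_nPalavrasUnicas; infer_instance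

-- ===== CLAIM (what is proved, stated in full; the proofs are below) =====
def Claim_equal_nPalavrasUnicas : Prop := ∀ (lista_palavras : List String), Dom_nPalavrasUnicas lista_palavras → Spec_nPalavrasUnicas lista_palavras (nPalavrasUnicas lista_palavras)

-- ===== LEMMAS AND PROOFS =====

-- number of words occurring exactly once in l
def pvCount1 (l : List String) : Nat :=
  (PySem.Set.ofList l).countP (fun k => l.count k = 1)

-- A's dict component is B's dict-building fold
theorem pvDictEq (l : List String) (d : PySem.Dict String Int) (u : Int) :
    (l.foldl nPalavrasUnicasStep (d, u)).1 =
      l.foldl (fun d palavra => d.insert (PySem.Str.lower palavra)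
        (d.getD (PySem.Str.lower palavra) 0 + 1)) d := by
  induction l generalizing d u with
  | nil => rfl
  | cons w t ih =>
    simp only [List.foldl_cons, nPalavrasUnicasStep]
    by_cases h : d.contains (PySem.Str.lower w) = true
    · simp [h, ih]
    · have h0 : d.getD (PySem.Str.lower w) 0 = 0 :=
        PySem.Dict.getD_of_not_contains d 0 (by simpa using h)
      simp [h, ih, h0]

-- B's dict is the Counter of the lowered words
theorem pvDictCounter (l : List String) :
    l.foldl (fun d palavra => d.insert (PySem.Str.lower palavra)
        (d.getD (PySem.Str.lower palavra) 0 + 1)) PySem.Dict.empty =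
      PySem.Dict.counter (l.map PySem.Str.lower) := by
  rw [← PySem.Dict.foldl_insert_getD_add_one_eq_counter, List.foldl_map]

-- countP on a Nodup list after changing the predicate at one member
theorem pvCountPUpdate {α : Type} (s : List α) (hs : s.Nodup) (p : α) (hp : p ∈ s)
    (f g : α → Bool) (h : ∀ k ∈ s, k ≠ p → f k = g k) :
    (s.countP g : Int) = (s.countP f : Int) +
      ((if g p then 1 else 0) - (if f p then 1 else 0)) := by
  induction s with
  | nil => cases hp
  | cons x t ih =>
    by_cases hxp : x = p
    · subst hxp
      have hpt : x ∉ t := (List.nodup_cons.mp hs).1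
      have ht : t.countP g = t.countP f := by
        apply List.countP_congr
        intro k hk
        rw [h k (List.mem_cons_of_mem _ hk) (fun e => hpt (e ▸ hk))]
      simp only [List.countP_cons, ht]
      by_cases hf : f x <;> by_cases hg : g x <;> simp [hf, hg]
    · have hpt : p ∈ t := (List.mem_cons.mp hp).resolve_left (fun e => hxp e.symm)
      have hfx : f x = g x := h x List.mem_cons_self hxp
      have hih := ih (List.nodup_cons.mp hs).2 hpt
        (fun k hk hkp => h k (List.mem_cons_of_mem _ hk) hkp)
      simp only [List.countP_cons, hfx]
      by_cases hg : g x <;> simp only [hg, if_true] <;> push_cast <;> omega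

-- the whole invariant of A's loop, by right-to-left induction
theorem pvMain (l : List String) :
    (l.foldl nPalavrasUnicasStep (PySem.Dict.empty, 0)).2 =
      (pvCount1 (l.map PySem.Str.lower) : Int) := by
  induction l using List.reverseRecOn with
  | nil => simp [pvCount1]
  | append_singleton t w ih =>
    have hd : (t.foldl nPalavrasUnicasStep (PySem.Dict.empty, 0)).1 =
        PySem.Dict.counter (t.map PySem.Str.lower) := by
      rw [pvDictEq, pvDictCounter]
    set L := t.map PySem.Str.lower with hL
    set p := PySem.Str.lower w with hp
    have hfold : ((t ++ [w]).foldl nPalavrasUnicasStep (PySem.Dict.empty, 0)) =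
        nPalavrasUnicasStep (t.foldl nPalavrasUnicasStep (PySem.Dict.empty, 0)) w := by
      simp [List.foldl_append]
    have hL' : (t ++ [w]).map PySem.Str.lower = L ++ [p] := by simp [hL, hp]
    have hS' : PySem.Set.ofList (L ++ [p]) = PySem.Set.add (PySem.Set.ofList L) p :=
      PySem.Set.ofList_append_singleton L p
    have hcount : ∀ k, (L ++ [p]).count k = L.count k + (if k = p then 1 else 0) := by
      intro k
      rw [List.count_append]
      by_cases hk : k = p
      · subst hk; simp
      · have h0 : List.count k [p] = 0 :=
          List.count_eq_zero.mpr (fun hm => hk (List.mem_singleton.mp hm))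
        rw [h0]; simp [hk]
    have hgd : (PySem.Dict.counter L).getD p 0 = (L.count p : Int) :=
      PySem.Dict.getD_counter L p
    rw [hfold, hL']
    simp only [nPalavrasUnicasStep, ← hp, hd, ih]
    by_cases hmem : p ∈ L
    · have hct : (PySem.Dict.counter L).contains p = true := by
        rw [PySem.Dict.contains_counter]; simpa using hmem
      have hadd : PySem.Set.add (PySem.Set.ofList L) p = PySem.Set.ofList L :=
        PySem.Set.add_of_mem ((PySem.Set.mem_ofList L p).mpr hmem)
      have hupd := pvCountPUpdate (PySem.Set.ofList L) (PySem.Set.nodup_ofList L) p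
        ((PySem.Set.mem_ofList L p).mpr hmem)
        (fun k => decide (L.count k = 1)) (fun k => decide ((L ++ [p]).count k = 1))
        (by intro k _ hk; simp [hcount k, hk])
      have hpos : 1 ≤ L.count p := List.one_le_count_iff.mpr hmem
      rw [if_pos hct]
      show (if (PySem.Dict.counter L).getD p 0 = 1 then _ - 1 else _) = _
      rw [hgd]
      unfold pvCount1
      rw [hS', hadd, hupd]
      by_cases h1 : L.count p = 1
      · rw [if_pos (by exact_mod_cast h1)]
        have e1 : (if (fun k => decide ((L ++ [p]).count k = 1)) p = true
            then (1 : Int) else 0) = 0 := by simp [hcount p, h1]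
        have e2 : (if (fun k => decide (L.count k = 1)) p = true
            then (1 : Int) else 0) = 1 := by simp [h1]
        rw [e1, e2]; ring
      · rw [if_neg (by exact_mod_cast h1)]
        have e1 : (if (fun k => decide ((L ++ [p]).count k = 1)) p = true
            then (1 : Int) else 0) = 0 := by simp [hcount p]; omega
        have e2 : (if (fun k => decide (L.count k = 1)) p = true
            then (1 : Int) else 0) = 0 := by simp [h1]
        rw [e1, e2]; ring
    · have hct : (PySem.Dict.counter L).contains p = false := by
        rw [PySem.Dict.contains_counter]; simpa using hmem
      have hadd : PySem.Set.add (PySem.Set.ofList L) p = PySem.Set.ofList L ++ [p] :=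
        PySem.Set.add_of_not_mem (fun hc => hmem ((PySem.Set.mem_ofList L p).mp hc))
      have hcongr : (PySem.Set.ofList L).countP (fun k => decide ((L ++ [p]).count k = 1)) =
          (PySem.Set.ofList L).countP (fun k => decide (L.count k = 1)) := by
        apply List.countP_congr
        intro k hk
        have hkp : k ≠ p := fun e => hmem (e ▸ ((PySem.Set.mem_ofList L k).mp hk))
        simp [hcount k, hkp]
      have hp1 : (L ++ [p]).count p = 1 := by
        rw [hcount p, List.count_eq_zero.mpr hmem]; simp
      rw [if_neg (by simp [hct])]
      show _ + 1 = _
      unfold pvCount1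
      rw [hS', hadd, List.countP_append, hcongr]
      have e1 : List.countP (fun k => decide ((L ++ [p]).count k = 1)) [p] = 1 := by
        simp only [List.countP_cons, List.countP_nil, hp1]
        simp
      rw [e1]
      push_cast
      ring

-- B unfolded: its result is pvCount1 of the lowered words
theorem pvAltEq (l : List String) :
    nPalavrasUnicas_alt l = (pvCount1 (l.map PySem.Str.lower) : Int) := by
  unfold nPalavrasUnicas_alt
  rw [pvDictCounter]
  show (((PySem.Dict.counter (l.map PySem.Str.lower)).values.countP
      (fun v => v = 1) : Nat) : Int) = _
  have hv : (PySem.Dict.counter (l.map PySem.Str.lower)).values =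
      (PySem.Set.ofList (l.map PySem.Str.lower)).map
        (fun k => ((l.map PySem.Str.lower).count k : Int)) := by
    show ((PySem.Dict.counter (l.map PySem.Str.lower)).items.map (·.2)) = _
    rw [PySem.Dict.items_counter, List.map_map]
    rfl
  rw [hv, List.countP_map]
  congr 1
  apply List.countP_congr
  intro k _
  simp [Function.comp]

-- ===== VERDICT (by name: the statement is the Claim_ definition above) =====
theorem nPalavrasUnicas_spec : Claim_equal_nPalavrasUnicas := by
  intro l _
  show nPalavrasUnicas l = nPalavrasUnicas_alt l
  rw [nPalavrasUnicas, pvMain, pvAltEq]
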